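-- pv_equiv track=rewrite | github.com/Hotsumm/BOJ-Programmers-Solution | Programmers/Level3/최고의집합.py | solution
-- ===== SOURCE A (Python) =====
-- def solution(n, s):
--     answer = []
--     while n:
--         temp = s // n
--         answer.append(temp)
--         s -= temp
--         n -= 1
--
--     if 0 in answer:
--         return [-1]
--
--     return answer
-- ===== SOURCE B (Python) =====
-- def solution(n, s):
--     if n == 0:
--         return []
--     base, rem = divmod(s, n)
--     answer = [base] * (n - rem) + [base + 1] * rem
--     if 0 in answer:
--         return [-1]
--     return answer
-- ===== Notes on version B (the rewrite author's own statement) =====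
-- stated objective: simpler
-- what changed: Replaces A's n-step repeated floor-division loop by a single divmod and two list replications [base]*(n-rem)+[base+1]*rem.
import Mathlib
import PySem

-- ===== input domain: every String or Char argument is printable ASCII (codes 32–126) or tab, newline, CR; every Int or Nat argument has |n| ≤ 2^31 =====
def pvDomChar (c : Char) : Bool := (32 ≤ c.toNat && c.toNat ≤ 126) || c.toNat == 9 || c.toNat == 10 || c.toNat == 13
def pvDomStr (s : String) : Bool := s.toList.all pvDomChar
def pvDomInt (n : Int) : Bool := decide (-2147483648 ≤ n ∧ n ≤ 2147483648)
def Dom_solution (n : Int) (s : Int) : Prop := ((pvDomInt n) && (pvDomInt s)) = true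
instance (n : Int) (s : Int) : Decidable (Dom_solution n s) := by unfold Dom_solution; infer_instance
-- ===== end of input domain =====

-- B replaces A's n-step repeated floor-division loop by one divmod and two list replications; objective: simpler.

-- ===== PORT A =====
-- A's while loop: each iteration appends s//n, subtracts it from s, decrements n.
-- (Terminating structural recursion on n.toNat; for n < 0 Python's loop never terminates — excluded by Pre_.)
def solutionLoop (n : Int) (s : Int) (answer : List Int) : List Int :=
  if n ≤ 0 then answer
  else
    let temp := PySem.Int.floordiv s n
    solutionLoop (n - 1) (s - temp) (answer ++ [temp])
termination_by n.toNat
decreasing_by omega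

def solution (n : Int) (s : Int) : List Int :=
  let answer := solutionLoop n s []
  if (0 : Int) ∈ answer then [-1] else answer

-- ===== PORT B =====
def solution_alt (n : Int) (s : Int) : List Int :=
  if n = 0 then []
  else
    let base := PySem.Int.floordiv s n
    let rem := PySem.Int.mod s n
    let answer := List.replicate (n - rem).toNat base ++ List.replicate rem.toNat (base + 1)
    if (0 : Int) ∈ answer then [-1] else answer

-- ===== PRECONDITION & SPEC =====
-- Pre_ excludes n < 0, on which A's 'while n:' loop never terminates (Python diverges, returns nothing).
def Pre_solution (n : Int) (_s : Int) : Prop := 0 ≤ n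
instance (n : Int) (s : Int) : Decidable (Pre_solution n s) := by unfold Pre_solution; infer_instance
def pvWitness_solution : Int × Int := (3, 7)

def Spec_solution (n : Int) (s : Int) (out : List Int) : Prop := out = solution_alt n s
instance (n : Int) (s : Int) (out : List Int) : Decidable (Spec_solution n s out) := by unfold Spec_solution; infer_instance

-- ===== CLAIM (what is proved, stated in full; the proofs are below) =====
def Claim_equal_solution : Prop := ∀ (n : Int) (s : Int), Dom_solution n s → Pre_solution n s → Spec_solution n s (solution n s)

-- ===== LEMMAS AND PROOFS =====

-- closed form of B's list
def formulaB (n s : Int) : List Int :=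
  List.replicate (n - PySem.Int.mod s n).toNat (PySem.Int.floordiv s n)
    ++ List.replicate (PySem.Int.mod s n).toNat (PySem.Int.floordiv s n + 1)

lemma loop_eq (k : Nat) : ∀ (s : Int) (acc : List Int),
    solutionLoop ((k : Int) + 1) s acc = acc ++ formulaB ((k : Int) + 1) s := by
  induction k with
  | zero =>
    intro s acc
    rw [solutionLoop, solutionLoop]
    simp [formulaB]
  | succ k ih =>
    intro s acc
    have hnpos : (0:Int) < (k : Int) + 1 + 1 := by omega
    rw [solutionLoop]
    push_cast
    rw [if_neg (by omega : ¬ ((k : Int) + 1 + 1 ≤ 0))]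
    have hstep : ((k : Int) + 1 + 1) - 1 = (k : Int) + 1 := by ring
    rw [hstep, ih]
    -- arithmetic: peel one element off the closed form
    set m : Int := (k : Int) + 1 + 1 with hm
    have hq := PySem.Int.floordiv_mul_add_mod s m
    set q : Int := PySem.Int.floordiv s m with hqdef
    set r : Int := PySem.Int.mod s m with hrdef
    have hr0 : 0 ≤ r := PySem.Int.mod_nonneg s hnpos
    have hr1 : r < m := PySem.Int.mod_lt s hnpos
    -- s - q = q * (m - 1) + r
    have hs' : s - q = r + (m - 1) * q := by linarith [hq]
    by_cases hcase : r < m - 1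
    · -- quotient/remainder of s - q by m - 1 are q and r
      have hdiv : (s - q) / (m - 1) = q := by
        rw [hs', Int.add_mul_ediv_left r q (by omega : m - 1 ≠ 0),
          Int.ediv_eq_zero_of_lt hr0 (by omega)]; ring
      have hmod : (s - q) % (m - 1) = r := by
        rw [hs', Int.add_mul_emod_self_left, Int.emod_eq_of_lt hr0 (by omega)]
      have hfd : PySem.Int.floordiv (s - q) (m - 1) = q := by
        rw [PySem.Int.floordiv_eq_ediv_of_pos (by omega : (0:Int) < m - 1)]; exact hdiv
      have hfm : PySem.Int.mod (s - q) (m - 1) = r := by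
        rw [PySem.Int.mod_eq_emod_of_pos (by omega : (0:Int) < m - 1)]; exact hmod
      have hmm : (m : Int) - 1 = (k : Int) + 1 := by omega
      simp only [formulaB, ← hmm, hfd, hfm, ← hqdef, ← hrdef]
      have hcount : (m - r).toNat = (m - 1 - r).toNat + 1 := by omega
      rw [hcount, List.replicate_succ]
      simp
    · -- r = m - 1 : quotient of s - q by m - 1 is q + 1, remainder 0
      have hreq : r = m - 1 := by omega
      have hs'' : s - q = (m - 1) * (q + 1) := by rw [hs', hreq]; ring
      have hdiv : (s - q) / (m - 1) = q + 1 := by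
        rw [hs'', Int.mul_ediv_cancel_left _ (by omega : m - 1 ≠ 0)]
      have hmod : (s - q) % (m - 1) = 0 := by
        rw [hs'', Int.mul_emod_right]
      have hfd : PySem.Int.floordiv (s - q) (m - 1) = q + 1 := by
        rw [PySem.Int.floordiv_eq_ediv_of_pos (by omega : (0:Int) < m - 1)]; exact hdiv
      have hfm : PySem.Int.mod (s - q) (m - 1) = 0 := by
        rw [PySem.Int.mod_eq_emod_of_pos (by omega : (0:Int) < m - 1)]; exact hmod
      have hmm : (m : Int) - 1 = (k : Int) + 1 := by omega
      simp only [formulaB, ← hmm, hfd, hfm, ← hqdef, ← hrdef]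
      have h1 : (m - r).toNat = 1 := by omega
      have h2 : r.toNat = (m - 1 - 0).toNat := by omega
      rw [h1, h2]
      simp [List.replicate_succ]

-- ===== VERDICT (by name: the statement is the Claim_ definition above) =====
theorem solution_spec : Claim_equal_solution := by
  intro n s _ hpre
  unfold Spec_solution solution solution_alt
  by_cases hz : n = 0
  · subst hz
    rw [solutionLoop]
    simp
  · have hpos : 0 < n := lt_of_le_of_ne hpre (Ne.symm hz)
    have hk : n = ((n.toNat - 1 : Nat) : Int) + 1 := by omega
    rw [hk, loop_eq (n.toNat - 1) s [], ← hk]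
    simp only [List.nil_append, if_neg hz, formulaB]
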